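-- pv_equiv track=rewrite | github.com/daniel-reich/ubiquitous-fiesta | F64txHnfYj4e4MpAN_11.py | schoty
-- ===== SOURCE A (Python) =====
-- def schoty(frame):
--   indicies = [
--     i.index('-')
--     for i in frame
--   ]
--   return sum(
--     j * 10 ** i
--     for i, j in enumerate(reversed(indicies))
--   )
-- ===== SOURCE B (Python) =====
-- def schoty(frame):
--   n = 0
--   for row in frame:
--     n = n * 10 + row.index('-')
--   return n
-- ===== Notes on version B (the rewrite author's own statement) =====
-- stated objective: simpler
-- what changed: Replaces the intermediate indices list plus the reversed/enumerate power-of-ten sum by a single left-to-right Horner accumulator n = n*10 + row.index('-').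
import Mathlib
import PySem

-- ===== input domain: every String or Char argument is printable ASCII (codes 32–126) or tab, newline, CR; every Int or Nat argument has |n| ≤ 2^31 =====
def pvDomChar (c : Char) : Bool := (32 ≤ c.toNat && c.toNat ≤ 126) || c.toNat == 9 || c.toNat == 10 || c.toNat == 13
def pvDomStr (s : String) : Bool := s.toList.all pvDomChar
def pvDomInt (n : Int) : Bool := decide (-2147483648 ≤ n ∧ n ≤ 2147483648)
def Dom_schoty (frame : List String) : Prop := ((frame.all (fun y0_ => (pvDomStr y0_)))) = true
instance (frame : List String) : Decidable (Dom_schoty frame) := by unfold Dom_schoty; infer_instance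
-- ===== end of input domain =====

-- B replaces the indices list and the reversed/enumerate power-of-ten sum by a single
-- left-to-right Horner accumulator (simpler; same values wherever A returns).

-- ===== PORT A =====
-- row.index('-') raises ValueError when '-' is absent; Pre_ excludes that, so getD 0 is never used inside Pre_.
def schoty (frame : List String) : Int :=
  let indicies : List Int := frame.map (fun i => ((PySem.List.index? i.toList '-').getD 0 : Int))
  ((PySem.List.enumerate indicies.reverse 0).map (fun p => p.2 * (10 : Int) ^ p.1.toNat)).sum

-- ===== PORT B =====
def schoty_alt (frame : List String) : Int :=
  frame.foldl (fun n row => n * 10 + ((PySem.List.index? row.toList '-').getD 0 : Int)) 0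

-- ===== PRECONDITION & SPEC =====
-- Pre_ excludes exactly the inputs where some row has no '-': there A (and B) raise ValueError.
def Pre_schoty (frame : List String) : Prop := ∀ s ∈ frame, '-' ∈ s.toList
instance (frame : List String) : Decidable (Pre_schoty frame) := by unfold Pre_schoty; infer_instance

def pvWitness_schoty : List String := ["-", "x-"]

def Spec_schoty (frame : List String) (out : Int) : Prop := out = schoty_alt frame
instance (frame : List String) (out : Int) : Decidable (Spec_schoty frame out) := by unfold Spec_schoty; infer_instance

-- ===== CLAIM (what is proved, stated in full; the proofs are below) =====
def Claim_equal_schoty : Prop := ∀ (frame : List String), Dom_schoty frame → Pre_schoty frame → Spec_schoty frame (schoty frame)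

-- ===== LEMMAS AND PROOFS =====

theorem horner_start (t : List Int) (s : Int) :
    t.foldl (fun n j => n * 10 + j) s = s * 10 ^ t.length + t.foldl (fun n j => n * 10 + j) 0 := by
  induction t generalizing s with
  | nil => simp
  | cons a t ih =>
    simp only [List.foldl_cons, List.length_cons]
    rw [ih (s * 10 + a), ih (0 * 10 + a)]
    ring

theorem sum_enum_rev_eq_horner (l : List Int) :
    ((PySem.List.enumerate l.reverse 0).map (fun p => p.2 * (10 : Int) ^ p.1.toNat)).sum
      = l.foldl (fun n j => n * 10 + j) 0 := by
  induction l with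
  | nil => simp
  | cons a t ih =>
    rw [List.reverse_cons, PySem.List.enumerate_append]
    simp only [List.map_append, List.sum_append, List.foldl_cons]
    rw [ih, horner_start t (0 * 10 + a)]
    simp only [PySem.List.enumerate, List.map_cons, List.map_nil, List.sum_cons, List.sum_nil, List.length_reverse, zero_add, Int.toNat_natCast]
    ring

-- ===== VERDICT (by name: the statement is the Claim_ definition above) =====
theorem schoty_spec : Claim_equal_schoty := by
  intro frame _ _
  unfold Spec_schoty schoty schoty_alt
  simp only []
  rw [show (List.foldl (fun n row => n * 10 + ((PySem.List.index? row.toList '-').getD 0 : Int)) 0 frame)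
        = List.foldl (fun n j => n * 10 + j) 0
            (frame.map (fun i => ((PySem.List.index? i.toList '-').getD 0 : Int))) from
      List.foldl_map.symm]
  exact sum_enum_rev_eq_horner _
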